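-- pv_equiv track=rewrite | github.com/KebabRonin/PY | lab2.py | ex9
-- ===== SOURCE A (Python) =====
-- def ex9(matrix):
--     lins = len(matrix)
--     cols = len(matrix[0])
--     list = []
--
--     for col_id in range(0, cols):
--         max_height = 0
--         for lin_id in range(0, lins):
--             if matrix[lin_id][col_id] <= max_height:
--                 list.append((lin_id, col_id))
--             else:
--                 max_height = matrix[lin_id][col_id]
--
--     return list
-- ===== SOURCE B (Python) =====
-- def ex9(matrix):
--     cols = len(matrix[0])
--     state = [(0, []) for _ in range(cols)]
--     for lin_id, row in enumerate(matrix):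
--         state = [(m, b + [(lin_id, c)]) if row[c] <= m else (row[c], b)
--                  for c, (m, b) in enumerate(state)]
--     return [p for (_, b) in state for p in b]
-- ===== Notes on version B (the rewrite author's own statement) =====
-- stated objective: alternative
-- what changed: Replaces A's column-major double loop (one running maximum at a time, appending to a single global list) by a single row-major pass that maintains a per-column array of (running max, bucket) pairs and flattens the buckets at the end.
import Mathlib
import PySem

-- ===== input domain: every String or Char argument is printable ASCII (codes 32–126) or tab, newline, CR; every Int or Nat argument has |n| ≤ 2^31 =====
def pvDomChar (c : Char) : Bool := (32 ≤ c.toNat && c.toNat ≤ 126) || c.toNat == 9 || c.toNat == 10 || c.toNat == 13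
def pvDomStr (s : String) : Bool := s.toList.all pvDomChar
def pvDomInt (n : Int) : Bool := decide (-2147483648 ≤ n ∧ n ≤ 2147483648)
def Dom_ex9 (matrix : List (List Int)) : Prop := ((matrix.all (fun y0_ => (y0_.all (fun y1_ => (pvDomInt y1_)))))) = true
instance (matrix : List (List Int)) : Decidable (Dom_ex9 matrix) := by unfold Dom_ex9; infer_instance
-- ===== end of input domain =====

-- B does a row-major pass with a per-column array of (running max, bucket) pairs instead of A's
-- column-major double loop; same return value everywhere Python A returns.

-- ===== PORT A =====
-- column-major: for each column a fresh running max, appending hits to one global list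
def ex9 (matrix : List (List Int)) : List (Int × Int) :=
  let lins : Int := matrix.length
  let cols : Int := (PySem.List.pyGetD matrix 0 []).length
  (PySem.List.pyRange 0 cols 1).foldl (fun acc col_id =>
    ((PySem.List.pyRange 0 lins 1).foldl (fun (s : Int × List (Int × Int)) lin_id =>
      let v := PySem.List.pyGetD (PySem.List.pyGetD matrix lin_id []) col_id 0
      if v ≤ s.1 then (s.1, s.2 ++ [(lin_id, col_id)]) else (v, s.2)) ((0 : Int), acc)).2) []

-- ===== PORT B =====
-- row-major: one pass over the rows, per-column state list of (running max, bucket)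
def ex9_alt (matrix : List (List Int)) : List (Int × Int) :=
  let cols : Nat := (PySem.List.pyGetD matrix 0 []).length
  let init : List (Int × List (Int × Int)) := List.replicate cols ((0 : Int), ([] : List (Int × Int)))
  let final := (PySem.List.enumerate matrix).foldl (fun state p =>
    (PySem.List.enumerate state).map (fun q =>
      let v := PySem.List.pyGetD p.2 q.1 0
      if v ≤ q.2.1 then (q.2.1, q.2.2 ++ [(p.1, q.1)]) else (v, q.2.2))) init
  final.flatMap (fun mb => mb.2)

-- ===== PRECONDITION & SPEC =====
-- Python A raises IndexError on an empty matrix (matrix[0]) and on any row shorter than row 0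
def Pre_ex9 (matrix : List (List Int)) : Prop :=
  matrix ≠ [] ∧ ∀ row ∈ matrix, matrix.headI.length ≤ row.length
instance (matrix : List (List Int)) : Decidable (Pre_ex9 matrix) := by unfold Pre_ex9; infer_instance

def pvWitness_ex9 : List (List Int) := [[1, 0], [0, 2]]

def Spec_ex9 (matrix : List (List Int)) (out : List (Int × Int)) : Prop := out = ex9_alt matrix
instance (matrix : List (List Int)) (out : List (Int × Int)) : Decidable (Spec_ex9 matrix out) := by unfold Spec_ex9; infer_instance

-- ===== CLAIM (what is proved, stated in full; the proofs are below) =====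
def Claim_equal_ex9 : Prop := ∀ (matrix : List (List Int)), Dom_ex9 matrix → Pre_ex9 matrix → Spec_ex9 matrix (ex9 matrix)

-- ===== LEMMAS AND PROOFS =====

-- the per-column scan, as a fold over (index, row) pairs
def colScan (rows : List (Int × List Int)) (j : Int) : Int × List (Int × Int) :=
  rows.foldl (fun s p =>
    if PySem.List.pyGetD p.2 j 0 ≤ s.1 then (s.1, s.2 ++ [(p.1, j)])
    else (PySem.List.pyGetD p.2 j 0, s.2)) ((0 : Int), [])

theorem colScan_append (rows : List (Int × List Int)) (p : Int × List Int) (j : Int) :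
    colScan (rows ++ [p]) j =
      (if PySem.List.pyGetD p.2 j 0 ≤ (colScan rows j).1 then
        ((colScan rows j).1, (colScan rows j).2 ++ [(p.1, j)])
       else (PySem.List.pyGetD p.2 j 0, (colScan rows j).2)) := by
  simp [colScan, List.foldl_append]

-- a fold whose step only appends to the second component factors the accumulator out
theorem foldl_snd_acc {α β : Type} (f : (Int × List β) → α → (Int × List β))
    (hf : ∀ (m : Int) (acc : List β) (x : α),
      f (m, acc) x = ((f (m, []) x).1, acc ++ (f (m, []) x).2))
    (l : List α) : ∀ (m : Int) (acc : List β),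
    l.foldl f (m, acc) = ((l.foldl f (m, [])).1, acc ++ (l.foldl f (m, [])).2) := by
  induction l with
  | nil => intro m acc; simp
  | cons x xs ih =>
    intro m acc
    simp only [List.foldl_cons]
    rw [hf m acc x, ih (f (m, []) x).1 (acc ++ (f (m, []) x).2)]
    conv_rhs => rw [show f (m, []) x = ((f (m, []) x).1, (f (m, []) x).2) from rfl,
      ih (f (m, []) x).1 (f (m, []) x).2]
    simp

-- B's folded state is pointwise colScan over the rows consumed so far
theorem altState (rows pre : List (Int × List Int)) (cols : Nat) :
    rows.foldl (fun state p =>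
      (PySem.List.enumerate state).map (fun q =>
        let v := PySem.List.pyGetD p.2 q.1 0
        if v ≤ q.2.1 then (q.2.1, q.2.2 ++ [(p.1, q.1)]) else (v, q.2.2)))
      ((List.range cols).map (fun (j : Nat) => colScan pre (j : Int))) =
    (List.range cols).map (fun (j : Nat) => colScan (pre ++ rows) (j : Int)) := by
  induction rows generalizing pre with
  | nil => simp
  | cons r rs ih =>
    simp only [List.foldl_cons]
    have hstep : (PySem.List.enumerate ((List.range cols).map (fun (j : Nat) => colScan pre (j : Int)))).map
        (fun q =>
          let v := PySem.List.pyGetD r.2 q.1 0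
          if v ≤ q.2.1 then (q.2.1, q.2.2 ++ [(r.1, q.1)]) else (v, q.2.2)) =
        (List.range cols).map (fun (j : Nat) => colScan (pre ++ [r]) (j : Int)) := by
      apply List.ext_getElem
      · simp [PySem.List.length_enumerate]
      · intro i h1 h2
        simp only [List.getElem_map, PySem.List.getElem_enumerate, List.getElem_range]
        rw [colScan_append]
        simp [PySem.List.pyGetD_natCast]
    rw [hstep]
    simpa using ih (pre ++ [r])

theorem ex9_eq_flat (matrix : List (List Int)) :
    ex9 matrix = (List.range (PySem.List.pyGetD matrix 0 []).length).flatMap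
      (fun (j : Nat) => (colScan (PySem.List.enumerate matrix) (j : Int)).2) := by
  have hc : ∀ (j : Int),
      colScan (PySem.List.enumerate matrix) j =
      (PySem.List.pyRange 0 (matrix.length : Int) 1).foldl
        (fun (s : Int × List (Int × Int)) lin_id =>
          if PySem.List.pyGetD (PySem.List.pyGetD matrix lin_id []) j 0 ≤ s.1 then
            (s.1, s.2 ++ [(lin_id, j)])
          else (PySem.List.pyGetD (PySem.List.pyGetD matrix lin_id []) j 0, s.2)) ((0 : Int), []) := by
    intro j
    unfold colScan
    rw [PySem.List.enumerate_eq_map_pyRange matrix ([] : List Int), List.foldl_map]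
    rfl
  have hinner : ∀ (j : Int) (acc : List (Int × Int)),
      ((PySem.List.pyRange 0 (matrix.length : Int) 1).foldl
        (fun (s : Int × List (Int × Int)) lin_id =>
          if PySem.List.pyGetD (PySem.List.pyGetD matrix lin_id []) j 0 ≤ s.1 then
            (s.1, s.2 ++ [(lin_id, j)])
          else (PySem.List.pyGetD (PySem.List.pyGetD matrix lin_id []) j 0, s.2)) ((0 : Int), acc)).2 =
      acc ++ (colScan (PySem.List.enumerate matrix) j).2 := by
    intro j acc
    rw [foldl_snd_acc _ (by
        intro m acc x
        by_cases h : PySem.List.pyGetD (PySem.List.pyGetD matrix x []) j 0 ≤ m <;> simp [h]) _ 0 acc]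
    rw [hc j]
  simp only [ex9]
  have hfold : ∀ (l : List Int) (acc : List (Int × Int)),
      l.foldl (fun acc (col_id : Int) =>
        ((PySem.List.pyRange 0 (matrix.length : Int) 1).foldl
          (fun (s : Int × List (Int × Int)) lin_id =>
            if PySem.List.pyGetD (PySem.List.pyGetD matrix lin_id []) col_id 0 ≤ s.1 then
              (s.1, s.2 ++ [(lin_id, col_id)])
            else (PySem.List.pyGetD (PySem.List.pyGetD matrix lin_id []) col_id 0, s.2))
          ((0 : Int), acc)).2) acc =
      acc ++ l.flatMap (fun (j : Int) => (colScan (PySem.List.enumerate matrix) j).2) := by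
    intro l
    induction l with
    | nil => intro acc; simp
    | cons k ks ih =>
      intro acc
      simp only [List.foldl_cons, List.flatMap_cons]
      rw [hinner k acc, ih]
      simp
  rw [hfold]
  rw [List.nil_append, PySem.List.pyRange_zero_natCast, List.flatMap_map]

theorem ex9_alt_eq_flat (matrix : List (List Int)) :
    ex9_alt matrix = (List.range (PySem.List.pyGetD matrix 0 []).length).flatMap
      (fun (j : Nat) => (colScan (PySem.List.enumerate matrix) (j : Int)).2) := by
  unfold ex9_alt
  have hinit : List.replicate (PySem.List.pyGetD matrix 0 []).length ((0 : Int), ([] : List (Int × Int))) =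
      (List.range (PySem.List.pyGetD matrix 0 []).length).map
        (fun (j : Nat) => colScan ([] : List (Int × List Int)) (j : Int)) := by
    simp [colScan, List.map_const']
  simp only [hinit]
  rw [show PySem.List.enumerate matrix = PySem.List.enumerate matrix 0 from rfl,
    altState (PySem.List.enumerate matrix 0) [] _]
  simp [List.flatMap_map]

-- ===== VERDICT (by name: the statement is the Claim_ definition above) =====
theorem ex9_spec : Claim_equal_ex9 := by
  intro matrix _ _
  unfold Spec_ex9
  rw [ex9_eq_flat, ex9_alt_eq_flat]
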